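-- pv_equiv track=rewrite | github.com/Coding-Club-Lab-Lyon/Sujets | BSQ/Cobra/main.py | check_bsq_map
-- ===== SOURCE A (Python) =====
-- def check_bsq_map(bsq_map: list[list[str]]) -> bool:
--     if not bsq_map:
--         return False
--
--     width = len(bsq_map[0])
--     for row in bsq_map:
--         if len(row) != width or any(cell not in {'o', '.'} for cell in row):
--             return False
--
--     return True
-- ===== SOURCE B (Python) =====
-- def check_bsq_map(bsq_map: list[list[str]]) -> bool:
--     if not bsq_map:
--         return False
--     if any(len(a) != len(b) for a, b in zip(bsq_map, bsq_map[1:])):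
--         return False
--     cells = set()
--     for row in bsq_map:
--         cells.update(row)
--     return cells <= {'o', '.'}
-- ===== Notes on version B (the rewrite author's own statement) =====
-- stated objective: alternative
-- what changed: Replaces the compare-each-row-to-the-first loop with fused cell scan and early return by two different mechanisms: width uniformity is established transitively by comparing only adjacent row pairs (zip of the map with its tail), and cell validity by accumulating the distinct cell alphabet into a set and testing it as a subset of {'o','.'}.
import Mathlib
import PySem

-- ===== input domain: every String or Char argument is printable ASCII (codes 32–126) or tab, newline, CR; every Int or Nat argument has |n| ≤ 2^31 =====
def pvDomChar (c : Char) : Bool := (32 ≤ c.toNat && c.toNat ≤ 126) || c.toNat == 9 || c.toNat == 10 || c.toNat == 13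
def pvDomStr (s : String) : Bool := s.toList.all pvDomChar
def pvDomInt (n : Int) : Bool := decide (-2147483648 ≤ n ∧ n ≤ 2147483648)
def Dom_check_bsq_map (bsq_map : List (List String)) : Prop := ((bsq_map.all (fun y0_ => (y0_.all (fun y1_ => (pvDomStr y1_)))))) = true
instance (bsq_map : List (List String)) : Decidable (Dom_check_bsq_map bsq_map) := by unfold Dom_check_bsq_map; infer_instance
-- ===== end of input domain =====

-- B checks width uniformity transitively over adjacent row pairs and cell validity via the accumulated cell alphabet as a set-subset test; objective: alternative.

-- ===== PORT A =====
-- the 'for row in bsq_map' loop with its early 'return False'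
def pvCheckRowsA (width : Nat) : List (List String) → Bool
  | [] => true
  | row :: rest =>
    if row.length != width
        || row.any (fun cell => !(PySem.Set.contains (PySem.Set.ofList ["o", "."]) cell)) then
      false
    else
      pvCheckRowsA width rest

def check_bsq_map (bsq_map : List (List String)) : Bool :=
  match bsq_map with
  | [] => false
  | first :: _ => pvCheckRowsA first.length bsq_map

-- ===== PORT B =====
def check_bsq_map_alt (bsq_map : List (List String)) : Bool :=
  if bsq_map.isEmpty then false
  else if (bsq_map.zip bsq_map.tail).any (fun p => p.1.length != p.2.length) then false
  else
    -- 'cells = set(); for row: cells.update(row)'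
    let cells : PySem.Set String :=
      bsq_map.foldl (fun s row => PySem.Set.update s row) PySem.Set.empty
    PySem.Set.issubset cells (PySem.Set.ofList ["o", "."])

-- ===== PRECONDITION & SPEC =====
def Spec_check_bsq_map (bsq_map : List (List String)) (out : Bool) : Prop := out = check_bsq_map_alt bsq_map
instance (bsq_map : List (List String)) (out : Bool) : Decidable (Spec_check_bsq_map bsq_map out) := by unfold Spec_check_bsq_map; infer_instance

-- ===== CLAIM =====
def Claim_equal_check_bsq_map : Prop := ∀ (bsq_map : List (List String)), Dom_check_bsq_map bsq_map → Spec_check_bsq_map bsq_map (check_bsq_map bsq_map)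

-- ===== LEMMAS AND PROOFS =====

-- A's loop is the conjunction, over the rows, of "right width and all cells valid"
theorem pvCheckRowsA_eq_all (width : Nat) (rows : List (List String)) :
    pvCheckRowsA width rows
      = rows.all (fun row => row.length == width
          && row.all (fun cell => PySem.Set.contains (PySem.Set.ofList ["o", "."]) cell)) := by
  induction rows with
  | nil => rfl
  | cons row rest ih =>
    have hsplit : ∀ (c x : Bool), (if c = true then false else x) = (!c && x) := by decide
    simp only [pvCheckRowsA, List.all_cons, ih, hsplit, Bool.not_or,
      ← List.all_eq_not_any_not]
    simp only [bne, Bool.not_not]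

-- adjacent-pair width equality over first::rest is equality of every rest row with first
theorem pvZip_adjacent (first : List String) (rest : List (List String)) :
    (((first :: rest).zip rest).any (fun p => p.1.length != p.2.length))
      = !(rest.all (fun r => r.length == first.length)) := by
  induction rest generalizing first with
  | nil => rfl
  | cons b l ih =>
    simp only [List.zip_cons_cons, List.any_cons, List.all_cons, ih, Bool.not_and]
    by_cases h : first.length = b.length
    · simp [h, bne]
    · have h' : ¬ b.length = first.length := fun he => h he.symm
      have hb : (first.length == b.length) = false := by simpa using h
      have hb' : (b.length == first.length) = false := by simpa using h'
      simp [bne, hb, hb']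

-- membership in the accumulated cell set
theorem pvMem_cells (rows : List (List String)) (s : PySem.Set String) (x : String) :
    x ∈ rows.foldl (fun s row => PySem.Set.update s row) s ↔ x ∈ s ∨ ∃ r ∈ rows, x ∈ r := by
  induction rows generalizing s with
  | nil => simp
  | cons r l ih =>
    simp only [List.foldl_cons, ih, PySem.Set.mem_update, List.mem_cons]
    constructor
    · rintro ((h | h) | ⟨q, hq, hx⟩)
      · exact Or.inl h
      · exact Or.inr ⟨r, Or.inl rfl, h⟩
      · exact Or.inr ⟨q, Or.inr hq, hx⟩
    · rintro (h | ⟨q, (rfl | hq), hx⟩)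
      · exact Or.inl (Or.inl h)
      · exact Or.inl (Or.inr hx)
      · exact Or.inr ⟨q, hq, hx⟩

-- ===== VERDICT =====
theorem check_bsq_map_spec : Claim_equal_check_bsq_map := by
  intro bsq_map _
  unfold Spec_check_bsq_map check_bsq_map check_bsq_map_alt
  match bsq_map with
  | [] => rfl
  | first :: rest =>
    simp only [List.isEmpty_cons, if_neg (by simp : ¬ (false = true)), List.tail_cons]
    rw [pvCheckRowsA_eq_all, pvZip_adjacent]
    by_cases hlen : (rest.all (fun r => r.length == first.length)) = true
    · rw [hlen]
      simp only [Bool.not_true, Bool.false_eq_true, if_false]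
      rw [Bool.eq_iff_iff, PySem.Set.issubset_iff]
      simp only [List.all_eq_true, Bool.and_eq_true, beq_iff_eq, List.all_eq_true] at hlen ⊢
      constructor
      · intro h x hx
        rw [pvMem_cells] at hx
        rcases hx with h' | ⟨r, hr, hxr⟩
        · exact absurd h' (by simp [PySem.Set.empty])
        · have := (h r hr).2 x hxr
          rwa [PySem.Set.contains_iff] at this
      · intro h r hr
        refine ⟨?_, fun x hx => ?_⟩
        · rcases List.mem_cons.mp hr with h' | h'
          · rw [h']
          · exact hlen r h'
        · rw [PySem.Set.contains_iff]
          exact h x ((pvMem_cells _ _ _).mpr (Or.inr ⟨r, hr, hx⟩))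
    · rw [Bool.not_eq_true] at hlen
      rw [hlen]
      simp only [Bool.not_false, if_true]
      apply List.all_eq_false.mpr
      obtain ⟨r, hr, hne⟩ := List.all_eq_false.mp hlen
      exact ⟨r, List.mem_cons_of_mem _ hr, by simp_all⟩
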